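-- pv_equiv track=rewrite | github.com/lil-lab/post-train-for-efficient-communication | post_train_efficiency/post-train/extract_conven.py | remove_white_space_before_punc
-- ===== SOURCE A (Python) =====
-- punct_no_white_space={".", ",", "!", "?", ":", ";", ")", "]", "}", ")", "]", "}", "'", '"',}
--
-- def remove_white_space_before_punc(line: str) -> str:
--     new_line=[]
--     line_len=len(line)
--     for i, tok in enumerate(line):
--         if i+1<line_len and line[i+1] in punct_no_white_space and tok==" ":
--             continue
--         else:
--             new_line.append(tok)
--     return "".join(new_line)
-- ===== SOURCE B (Python) =====
-- punct_no_white_space = {".", ",", "!", "?", ":", ";", ")", "]", "}", "'", '"'}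
--
-- def remove_white_space_before_punc(line: str) -> str:
--     # single right-to-left pass with one boolean of lookahead state (no indexing)
--     out = []
--     drop_space = False  # True iff the character to the right is punctuation
--     for c in reversed(line):
--         if not (c == " " and drop_space):
--             out.append(c)
--         drop_space = c in punct_no_white_space
--     return "".join(reversed(out))
-- ===== Notes on version B (the rewrite author's own statement) =====
-- stated objective: alternative
-- what changed: Replaces the index loop with bounds check and line[i+1] lookup by a single right-to-left pass carrying one boolean of lookahead state recording whether the character to the right is punctuation, so no indexing or length arithmetic remains.
import Mathlib
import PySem

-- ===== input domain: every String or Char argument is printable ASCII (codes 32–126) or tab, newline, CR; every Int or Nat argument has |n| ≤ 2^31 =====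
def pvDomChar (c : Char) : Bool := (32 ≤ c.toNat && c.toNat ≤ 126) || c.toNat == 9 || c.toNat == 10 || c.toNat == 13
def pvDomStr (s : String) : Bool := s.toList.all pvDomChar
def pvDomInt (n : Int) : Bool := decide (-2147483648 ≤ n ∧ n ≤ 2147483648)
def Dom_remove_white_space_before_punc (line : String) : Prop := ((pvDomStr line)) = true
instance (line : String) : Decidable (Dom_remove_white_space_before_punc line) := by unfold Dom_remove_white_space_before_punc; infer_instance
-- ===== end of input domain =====

-- B replaces A's index loop by a right-to-left pass carrying one boolean of lookahead state (alternative decomposition, same cost).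

-- ===== PORT A =====
def punct_no_white_space : PySem.Set Char :=
  PySem.Set.ofList ['.', ',', '!', '?', ':', ';', ')', ']', '}', ')', ']', '}', '\'', '"']

def remove_white_space_before_punc (line : String) : String :=
  let cs := line.toList
  let line_len := cs.length
  -- line[i+1] is guarded by i+1 < line_len, so the total pyGetD form is exact here
  let new_line := (PySem.List.enumerate cs 0).foldl
    (fun (acc : List Char) (p : Int × Char) =>
      if p.1 + 1 < (line_len : Int)
          ∧ PySem.Set.contains punct_no_white_space (PySem.List.pyGetD cs (p.1 + 1) ' ') = true
          ∧ p.2 = ' '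
      then acc else acc ++ [p.2]) []
  String.ofList new_line

-- ===== PORT B =====
def bStep (st : List Char × Bool) (c : Char) : List Char × Bool :=
  (if c = ' ' ∧ st.2 = true then st.1 else st.1 ++ [c],
   PySem.Set.contains punct_no_white_space c)

def remove_white_space_before_punc_alt (line : String) : String :=
  String.ofList ((line.toList.reverse.foldl bStep ([], false)).1.reverse)

-- ===== PRECONDITION & SPEC =====
def Spec_remove_white_space_before_punc (line : String) (out : String) : Prop := out = remove_white_space_before_punc_alt line
instance (line : String) (out : String) : Decidable (Spec_remove_white_space_before_punc line out) := by unfold Spec_remove_white_space_before_punc; infer_instance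

-- ===== CLAIM (what is proved, stated in full; the proofs are below) =====
def Claim_equal_remove_white_space_before_punc : Prop := ∀ (line : String), Dom_remove_white_space_before_punc line → Spec_remove_white_space_before_punc line (remove_white_space_before_punc line)

-- ===== LEMMAS AND PROOFS =====

-- common recursive characterization of both ports
def go : List Char → List Char
  | [] => []
  | [c] => [c]
  | c :: d :: rest =>
      if c = ' ' ∧ PySem.Set.contains punct_no_white_space d = true
      then go (d :: rest) else c :: go (d :: rest)

lemma bStep_fst (st : List Char × Bool) (c : Char) :
    (bStep st c).1 = if c = ' ' ∧ st.2 = true then st.1 else st.1 ++ [c] := rfl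

lemma go_nil : go [] = [] := rfl
lemma go_single (c : Char) : go [c] = [c] := rfl
lemma go_cons2 (c d : Char) (rest : List Char) :
    go (c :: d :: rest) =
      if c = ' ' ∧ PySem.Set.contains punct_no_white_space d = true
      then go (d :: rest) else c :: go (d :: rest) := rfl

lemma a_fold (cs : List Char) : ∀ (pre acc : List Char),
    (PySem.List.enumerate cs (pre.length : Int)).foldl
      (fun (acc : List Char) (p : Int × Char) =>
        if p.1 + 1 < (((pre ++ cs).length : Nat) : Int)
            ∧ PySem.Set.contains punct_no_white_space (PySem.List.pyGetD (pre ++ cs) (p.1 + 1) ' ') = true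
            ∧ p.2 = ' '
        then acc else acc ++ [p.2]) acc
    = acc ++ go cs := by
  induction cs with
  | nil => intro pre acc; simp [PySem.List.enumerate_nil, go_nil]
  | cons c rest ih =>
    intro pre acc
    rw [PySem.List.enumerate_cons]
    simp only [List.foldl_cons]
    have hcast : ((pre.length : Int) + 1) = (((pre ++ [c]).length : Nat) : Int) := by
      simp
    cases rest with
    | nil =>
      have hno : ¬ ((pre.length : Int) + 1 < (((pre ++ [c]).length : Nat) : Int)
          ∧ PySem.Set.contains punct_no_white_space (PySem.List.pyGetD (pre ++ [c]) ((pre.length : Int) + 1) ' ') = true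
          ∧ c = ' ') := by
        intro h
        have := h.1
        simp only [List.length_append, List.length_cons, List.length_nil] at this
        push_cast at this
        omega
      rw [if_neg hno]
      simp [PySem.List.enumerate_nil, go_single]
    | cons d rest' =>
      have hget : PySem.List.pyGetD (pre ++ c :: d :: rest') ((pre.length : Int) + 1) ' ' = d := by
        have h1 : ((pre.length : Int) + 1) = ((pre.length + 1 : Nat) : Int) := by push_cast; ring
        rw [h1, PySem.List.pyGetD_natCast]
        simp [List.getD_eq_getElem?_getD]
      have hlt : ((pre.length : Int) + 1 < (((pre ++ c :: d :: rest').length : Nat) : Int)) := by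
        simp only [List.length_append, List.length_cons]; push_cast; omega
      rw [hget]
      have hrw : pre ++ c :: d :: rest' = (pre ++ [c]) ++ d :: rest' := by simp
      by_cases hc : c = ' ' ∧ PySem.Set.contains punct_no_white_space d = true
      · rw [if_pos ⟨hlt, hc.2, hc.1⟩]
        rw [hrw, hcast, ih (pre ++ [c]) acc]
        rw [go_cons2, if_pos hc]
      · rw [if_neg (by intro h; exact hc ⟨h.2.2, h.2.1⟩)]
        rw [hrw, hcast, ih (pre ++ [c]) (acc ++ [c])]
        rw [go_cons2, if_neg hc]
        simp

lemma b_foldr (cs : List Char) :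
    (cs.foldr (fun c st => bStep st c) ([], false)).1 = (go cs).reverse
    ∧ (cs.foldr (fun c st => bStep st c) ([], false)).2
        = (cs.head?.elim false (fun c => PySem.Set.contains punct_no_white_space c)) := by
  induction cs with
  | nil => exact ⟨rfl, rfl⟩
  | cons c rest ih =>
    obtain ⟨h1, h2⟩ := ih
    cases rest with
    | nil => refine ⟨?_, rfl⟩; simp [bStep, go_single]
    | cons d rest' =>
      refine ⟨?_, rfl⟩
      simp only [List.head?_cons, Option.elim] at h2
      rw [List.foldr_cons]
      rw [bStep_fst, h1, h2, go_cons2]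
      by_cases hc : c = ' ' ∧ PySem.Set.contains punct_no_white_space d = true
      · rw [if_pos hc, if_pos hc]
      · rw [if_neg hc, if_neg hc]; simp

-- ===== VERDICT (by name: the statement is the Claim_ definition above) =====
theorem remove_white_space_before_punc_spec : Claim_equal_remove_white_space_before_punc := by
  intro line _
  show _ = _
  have hA := a_fold line.toList [] []
  simp only [List.nil_append, List.length_nil, Int.natCast_zero] at hA
  have hB := (b_foldr line.toList).1
  simp only [remove_white_space_before_punc, remove_white_space_before_punc_alt,
    List.foldl_reverse, hB, List.reverse_reverse]
  exact congrArg String.ofList hA
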